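-- pv_equiv track=rewrite | github.com/CongressionalInsights/theworkshop | scripts/tw_tools.py | replace_section
-- ===== SOURCE A (Python) =====
-- def replace_section(body: str, heading: str, lines: list[str]) -> str:
--     content = "\n".join(lines).rstrip()
--     if heading not in body:
--         return body.rstrip() + f"\n\n{heading}\n\n{content}\n"
--
--     all_lines = body.splitlines()
--     start = None
--     for i, ln in enumerate(all_lines):
--         if ln.strip() == heading.strip():
--             start = i
--             break
--     if start is None:
--         return body.rstrip() + f"\n\n{heading}\n\n{content}\n"
--
--     end = len(all_lines)
--     for i in range(start + 1, len(all_lines)):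
--         if all_lines[i].startswith("# "):
--             end = i
--             break
--
--     out = all_lines[: start + 1]
--     out.append("")
--     out.extend(content.splitlines() if content else [])
--     out.append("")
--     out.extend(all_lines[end:])
--     return "\n".join(out).rstrip() + "\n"
-- ===== SOURCE B (Python) =====
-- def replace_section(body: str, heading: str, lines: list[str]) -> str:
--     """Section-list decomposition: parse body into '# '-delimited sections once,
--     replace the matched section's content block, and re-join."""
--     content = "\n".join(lines).rstrip()
--     if heading not in body:
--         return body.rstrip() + f"\n\n{heading}\n\n{content}\n"
--
--     all_lines = body.splitlines()
--     sections = []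
--     i, n = 0, len(all_lines)
--     while i < n:
--         j = i + 1
--         while j < n and not all_lines[j].startswith("# "):
--             j += 1
--         sections.append(all_lines[i:j])
--         i = j
--
--     target = heading.strip()
--     mid = [""] + (content.splitlines() if content else []) + [""]
--     for k, blk in enumerate(sections):
--         for j, ln in enumerate(blk):
--             if ln.strip() == target:
--                 out = (
--                     [x for b in sections[:k] for x in b]
--                     + blk[: j + 1]
--                     + mid
--                     + [x for b in sections[k + 1 :] for x in b]
--                 )
--                 return "\n".join(out).rstrip() + "\n"
--     return body.rstrip() + f"\n\n{heading}\n\n{content}\n"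
-- ===== Notes on version B (the rewrite author's own statement) =====
-- stated objective: alternative
-- what changed: B parses the body once into a list of '# '-delimited sections and rebuilds the document from that section list, instead of A's start-index search plus end-index scan and list slicing.
import Mathlib
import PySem

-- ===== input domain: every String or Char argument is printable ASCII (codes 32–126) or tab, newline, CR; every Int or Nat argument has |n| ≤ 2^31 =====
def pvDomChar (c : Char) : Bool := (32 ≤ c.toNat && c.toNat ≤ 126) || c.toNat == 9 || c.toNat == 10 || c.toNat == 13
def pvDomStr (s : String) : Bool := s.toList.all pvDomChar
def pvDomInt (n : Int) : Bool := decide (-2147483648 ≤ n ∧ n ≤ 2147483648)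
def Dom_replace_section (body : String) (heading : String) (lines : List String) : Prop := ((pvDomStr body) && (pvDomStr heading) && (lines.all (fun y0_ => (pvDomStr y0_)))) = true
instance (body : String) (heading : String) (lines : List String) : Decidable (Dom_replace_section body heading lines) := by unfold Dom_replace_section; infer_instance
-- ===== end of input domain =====

-- B replaces A's index-slicing (find start line, scan for end index, splice slices) by a
-- single parse of the body into '# '-delimited sections followed by a section-list rebuild;
-- same return value, alternative decomposition (no speed claim).

-- ===== PORT A =====
-- A's second loop: first offset (from the scan start) of a line starting with "# ", else length.
def pvScanEnd : List String → Nat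
  | [] => 0
  | ln :: rest => if PySem.Str.startswith ln "# " then 0 else pvScanEnd rest + 1

def replace_section (body : String) (heading : String) (lines : List String) : String :=
  let content := PySem.Str.rstrip (PySem.Str.join "\n" lines)
  if !(PySem.Str.isIn heading body) then
    PySem.Str.join "" [PySem.Str.rstrip body, "\n\n", heading, "\n\n", content, "\n"]
  else
    let allLines := PySem.Str.splitlines body
    match allLines.findIdx? (fun ln => PySem.Str.strip ln == PySem.Str.strip heading) with
    | none => PySem.Str.join "" [PySem.Str.rstrip body, "\n\n", heading, "\n\n", content, "\n"]
    | some start =>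
      let endIdx := start + 1 + pvScanEnd (allLines.drop (start + 1))
      let out := allLines.take (start + 1) ++ [""]
          ++ (if content ≠ "" then PySem.Str.splitlines content else []) ++ [""]
          ++ allLines.drop endIdx
      PySem.Str.join "" [PySem.Str.rstrip (PySem.Str.join "\n" out), "\n"]

-- ===== PORT B =====
-- B's parser: split the line list into sections, a new section at every line starting with "# ".
def pvSections : List String → List (List String)
  | [] => []
  | ln :: rest =>
      (ln :: rest.takeWhile (fun l => !PySem.Str.startswith l "# ")) ::
        pvSections (rest.dropWhile (fun l => !PySem.Str.startswith l "# "))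
  termination_by L => L.length
  decreasing_by simpa using Nat.lt_succ_of_le (List.length_dropWhile_le _ rest)

-- B's search loop: first section containing a line whose strip equals the target;
-- rebuild the line list with that section's content block replaced by `mid`.
def pvSearch (target : String) (mid : List String) : List (List String) → Option (List String)
  | [] => none
  | blk :: rest =>
      match blk.findIdx? (fun ln => PySem.Str.strip ln == target) with
      | some j => some (blk.take (j + 1) ++ mid ++ rest.flatten)
      | none => (pvSearch target mid rest).map (blk ++ ·)

def replace_section_alt (body : String) (heading : String) (lines : List String) : String :=
  let content := PySem.Str.rstrip (PySem.Str.join "\n" lines)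
  if !(PySem.Str.isIn heading body) then
    PySem.Str.join "" [PySem.Str.rstrip body, "\n\n", heading, "\n\n", content, "\n"]
  else
    let mid := [""] ++ (if content ≠ "" then PySem.Str.splitlines content else []) ++ [""]
    match pvSearch (PySem.Str.strip heading) mid (pvSections (PySem.Str.splitlines body)) with
    | some out => PySem.Str.join "" [PySem.Str.rstrip (PySem.Str.join "\n" out), "\n"]
    | none => PySem.Str.join "" [PySem.Str.rstrip body, "\n\n", heading, "\n\n", content, "\n"]

-- ===== PRECONDITION & SPEC =====
def Spec_replace_section (body : String) (heading : String) (lines : List String) (out : String) : Prop := out = replace_section_alt body heading lines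
instance (body : String) (heading : String) (lines : List String) (out : String) : Decidable (Spec_replace_section body heading lines out) := by unfold Spec_replace_section; infer_instance

-- ===== CLAIM (what is proved, stated in full; the proofs are below) =====
def Claim_equal_replace_section : Prop := ∀ (body : String) (heading : String) (lines : List String), Dom_replace_section body heading lines → Spec_replace_section body heading lines (replace_section body heading lines)

-- ===== LEMMAS AND PROOFS =====

lemma pvFlatten_pvSections (L : List String) : (pvSections L).flatten = L := by
  induction L using pvSections.induct with
  | case1 => rw [pvSections]; rfl
  | case2 ln rest ih =>
      rw [pvSections, List.flatten_cons, ih, List.cons_append,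
        List.takeWhile_append_dropWhile]

lemma pvDrop_pvScanEnd (xs : List String) :
    xs.drop (pvScanEnd xs) = xs.dropWhile (fun l => !PySem.Str.startswith l "# ") := by
  induction xs with
  | nil => rfl
  | cons x t ih =>
      rw [List.dropWhile_cons]
      by_cases h : PySem.Str.startswith x "# "
      · rw [pvScanEnd, if_pos h, List.drop_zero, if_neg (by rw [h]; simp)]
      · rw [pvScanEnd, if_neg h, if_pos (by rw [Bool.not_eq_true] at h; rw [h]; rfl),
          List.drop_succ_cons, ih]

lemma pvDropWhile_append_of_all {q : String → Bool} (X R : List String)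
    (h : ∀ x ∈ X, q x = true) :
    List.dropWhile q (X ++ R) = List.dropWhile q R := by
  induction X with
  | nil => rfl
  | cons x t ih =>
      rw [List.cons_append, List.dropWhile_cons, if_pos (h x (by simp))]
      exact ih (fun y hy => h y (by simp [hy]))

lemma pvDropWhile_dropWhile {q : String → Bool} (l : List String) :
    List.dropWhile q (List.dropWhile q l) = List.dropWhile q l := by
  induction l with
  | nil => rfl
  | cons x t ih =>
      rw [List.dropWhile_cons]
      by_cases h : q x
      · rw [if_pos h]; exact ih
      · rw [if_neg h, List.dropWhile_cons, if_neg h]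

lemma pvSearch_eq (t : String) (mid : List String) (L : List String) :
    pvSearch t mid (pvSections L) =
      (L.findIdx? (fun ln => PySem.Str.strip ln == t)).map
        (fun s => L.take (s + 1) ++ mid ++ L.drop (s + 1 + pvScanEnd (L.drop (s + 1)))) := by
  induction L using pvSections.induct with
  | case1 => rw [pvSections]; rfl
  | case2 ln rest ih =>
      rw [pvSections, pvSearch]
      generalize hT : List.takeWhile (fun l => !PySem.Str.startswith l "# ") rest = T at *
      generalize hR : List.dropWhile (fun l => !PySem.Str.startswith l "# ") rest = R at *
      have hTq : ∀ x ∈ T, (!PySem.Str.startswith x "# ") = true := by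
        intro x hx
        rw [← hT] at hx
        exact @List.mem_takeWhile_imp String (fun l => !PySem.Str.startswith l "# ") rest x hx
      have hL : ln :: rest = (ln :: T) ++ R := by
        rw [List.cons_append]
        conv_lhs => rw [← List.takeWhile_append_dropWhile
          (p := fun l => !PySem.Str.startswith l "# ") (l := rest), hT, hR]
      have hRfix : List.dropWhile (fun l => !PySem.Str.startswith l "# ") R = R := by
        rw [← hR, pvDropWhile_dropWhile]
      conv_rhs => rw [hL]
      rw [List.findIdx?_append]
      cases hfb : (ln :: T).findIdx? (fun ln => PySem.Str.strip ln == t) with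
      | some j =>
          have hjlen : j < (ln :: T).length := (List.findIdx?_eq_some_iff_findIdx_eq.mp hfb).1
          have hj1 : j + 1 ≤ (ln :: T).length := hjlen
          dsimp only [Option.some_or, Option.map_some]
          have htake : ((ln :: T) ++ R).take (j + 1) = (ln :: T).take (j + 1) := by
            rw [List.take_append, Nat.sub_eq_zero_of_le hj1, List.take_zero, List.append_nil]
          have hdrop : ((ln :: T) ++ R).drop (j + 1) = (ln :: T).drop (j + 1) ++ R := by
            rw [List.drop_append, Nat.sub_eq_zero_of_le hj1, List.drop_zero]
          have hblkdropq : ∀ x ∈ (ln :: T).drop (j + 1),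
              (!PySem.Str.startswith x "# ") = true := by
            intro x hx
            rw [List.drop_succ_cons] at hx
            exact hTq x (List.mem_of_mem_drop hx)
          have hdw : List.dropWhile (fun l => !PySem.Str.startswith l "# ")
              ((ln :: T).drop (j + 1) ++ R) = R := by
            rw [pvDropWhile_append_of_all _ _ hblkdropq, hRfix]
          rw [htake, ← List.drop_drop, hdrop, pvDrop_pvScanEnd, hdw, pvFlatten_pvSections]
      | none =>
          dsimp only [Option.none_or]
          rw [ih, Option.map_map]
          cases hfR : R.findIdx? (fun ln => PySem.Str.strip ln == t) with
          | none => rfl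
          | some s =>
              dsimp only [Option.map_some, Function.comp_apply]
              congr 1
              have hlen : (ln :: T).length ≤ s + (ln :: T).length + 1 := by omega
              have htake : ((ln :: T) ++ R).take (s + (ln :: T).length + 1)
                  = (ln :: T) ++ R.take (s + 1) := by
                rw [List.take_append, List.take_of_length_le hlen]
                congr 2
                omega
              have hdrop : ((ln :: T) ++ R).drop (s + (ln :: T).length + 1)
                  = R.drop (s + 1) := by
                rw [List.drop_append, List.drop_of_length_le hlen, List.nil_append]
                congr 1
                omega
              have hdrop2 : List.drop (s + (ln :: T).length + 1
                    + pvScanEnd (List.drop (s + 1) R)) ((ln :: T) ++ R)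
                  = List.drop (s + 1 + pvScanEnd (List.drop (s + 1) R)) R := by
                rw [List.drop_append, List.drop_of_length_le (by simp; omega), List.nil_append]
                congr 1
                omega
              rw [htake, hdrop, hdrop2]
              simp only [List.append_assoc]

-- ===== VERDICT (by name: the statement is the Claim_ definition above) =====
theorem replace_section_spec : Claim_equal_replace_section := by
  intro body heading lines _
  unfold Spec_replace_section
  simp only [replace_section, replace_section_alt]
  by_cases hin : PySem.Str.isIn heading body
  · have h1 : (!PySem.Str.isIn heading body) = false := by rw [hin]; rfl
    simp only [h1, Bool.false_eq_true, if_false]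
    rw [pvSearch_eq]
    cases hf : (PySem.Str.splitlines body).findIdx?
        (fun ln => PySem.Str.strip ln == PySem.Str.strip heading) with
    | none => rfl
    | some s =>
        dsimp only [Option.map_some]
        simp only [List.append_assoc]
  · rw [Bool.not_eq_true] at hin
    have h1 : (!PySem.Str.isIn heading body) = true := by rw [hin]; rfl
    simp only [h1, if_true]
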